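-- pv_equiv track=rewrite | github.com/AyrtonCossuol/practices_signals_and_systems | Laboratorio_4/exercicio_4_b_ayrtoncossuol.py | impulso
-- ===== SOURCE A (Python) =====
-- def impulso(n0, sinal):
--   imp = []
--
--   for i in range(-2, 21):
--     if i == n0:
--       if sinal == 1:
--         imp.append(1)
--       else:
--         imp.append(-1)
--     else:
--       imp.append(0)
--
--   return imp
-- ===== SOURCE B (Python) =====
-- def impulso(n0, sinal):
--     imp = [0] * 23
--     if -2 <= n0 <= 20:
--         imp[n0 + 2] = 1 if sinal == 1 else -1
--     return imp
-- ===== Notes on version B (the rewrite author's own statement) =====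
-- stated objective: simpler
-- what changed: Replaces the 23-iteration scan-and-compare loop with a pre-allocated zero array and a closed-form index write at n0+2 when -2 <= n0 <= 20.
import Mathlib
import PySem

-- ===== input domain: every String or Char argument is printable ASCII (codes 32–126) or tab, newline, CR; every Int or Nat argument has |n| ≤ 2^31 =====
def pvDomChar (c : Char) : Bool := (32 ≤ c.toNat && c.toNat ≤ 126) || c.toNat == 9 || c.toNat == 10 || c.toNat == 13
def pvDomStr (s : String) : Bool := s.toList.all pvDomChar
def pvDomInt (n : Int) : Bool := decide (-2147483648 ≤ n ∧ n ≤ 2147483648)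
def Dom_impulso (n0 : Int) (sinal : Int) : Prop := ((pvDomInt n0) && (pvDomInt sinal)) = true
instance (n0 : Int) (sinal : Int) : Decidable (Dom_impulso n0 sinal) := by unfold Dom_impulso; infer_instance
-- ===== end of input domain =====

-- B replaces A's 23-step scan-and-compare loop with a zero array and a single closed-form index write (objective: simpler).

-- ===== PORT A =====
-- A: for i in range(-2, 21): append 1/-1 if i == n0 else 0
def impulso (n0 : Int) (sinal : Int) : List Int :=
  (PySem.List.pyRange (-2) 21 1).foldl
    (fun imp i =>
      if i == n0 then
        if sinal == 1 then imp ++ [1] else imp ++ [-1]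
      else imp ++ [0])
    []

-- ===== PORT B =====
-- B: imp = [0]*23; if -2 <= n0 <= 20: imp[n0+2] = 1 if sinal == 1 else -1
def impulso_alt (n0 : Int) (sinal : Int) : List Int :=
  let imp : List Int := List.replicate 23 0
  if -2 ≤ n0 ∧ n0 ≤ 20 then
    imp.set (n0 + 2).toNat (if sinal == 1 then 1 else -1)
  else imp

-- ===== PRECONDITION & SPEC =====
def Spec_impulso (n0 : Int) (sinal : Int) (out : List Int) : Prop := out = impulso_alt n0 sinal
instance (n0 : Int) (sinal : Int) (out : List Int) : Decidable (Spec_impulso n0 sinal out) := by unfold Spec_impulso; infer_instance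

-- ===== CLAIM (what is proved, stated in full; the proofs are below) =====
def Claim_equal_impulso : Prop := ∀ (n0 : Int) (sinal : Int), Dom_impulso n0 sinal → Spec_impulso n0 sinal (impulso n0 sinal)

-- ===== LEMMAS AND PROOFS =====
theorem impulso_eq (n0 sinal : Int) : impulso n0 sinal = impulso_alt n0 sinal := by
  by_cases h : -2 ≤ n0 ∧ n0 ≤ 20
  · obtain ⟨h1, h2⟩ := h
    by_cases hs : sinal = 1
    · subst hs; interval_cases n0 <;> decide
    · have hs' : (sinal == 1) = false := by simp [hs]
      interval_cases n0 <;> simp [impulso, impulso_alt, hs', PySem.List.pyRange] <;> decide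
  · have hne : ∀ i ∈ PySem.List.pyRange (-2) 21 1, ¬ (i == n0) = true := by
      intro i hi
      have : -2 ≤ i ∧ i < 21 := by
        have := PySem.List.mem_pyRange_one.mp hi
        omega
      simp only [beq_iff_eq]
      omega
    simp only [impulso, impulso_alt, if_neg h]
    have : ∀ (acc : List Int) (l : List Int), (∀ i ∈ l, ¬ (i == n0) = true) →
        l.foldl (fun imp i => if i == n0 then (if sinal == 1 then imp ++ [1] else imp ++ [-1]) else imp ++ [0]) acc
        = acc ++ List.replicate l.length 0 := by
      intro acc l
      induction l generalizing acc with
      | nil => simp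
      | cons x xs ih =>
        intro hall
        have hx' : ¬ (x == n0) = true := hall x (by simp)
        rw [List.foldl_cons, if_neg hx']
        rw [ih _ (fun i hi => hall i (by simp [hi]))]
        simp [List.replicate_succ]
    rw [this [] _ hne]
    rfl

-- ===== VERDICT =====
theorem impulso_spec : Claim_equal_impulso := by
  intro n0 sinal _
  unfold Spec_impulso
  exact impulso_eq n0 sinal
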